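-- pv_equiv track=rewrite | github.com/pypi-data/pypi-mirror-404 | packages/bossanova/bossanova-0.1.0.dev4.tar.gz/bossanova-0.1.0.dev4/bossanova/formula/z_matrix.py | _generate_column_labels
-- ===== SOURCE A (Python) =====
-- from typing import TYPE_CHECKING, Literal
--
-- def _generate_column_labels(
--     group_name: str,
--     group_levels: list[str] | None,
--     random_names: list[str],
--     n_groups: int,
--     layout: Literal["interleaved", "blocked"],
-- ) -> list[str]:
--     """Generate human-readable column labels for Z matrix.
--
--     Args:
--         group_name: Name of grouping factor (e.g., "Subject").
--         group_levels: Level names, or None to use indices.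
--         random_names: Names of random effects (e.g., ["Intercept", "Days"]).
--         n_groups: Number of groups.
--         layout: Column layout.
--
--     Returns:
--         List of column labels.
--     """
--     if group_levels is None:
--         group_levels = [str(i) for i in range(n_groups)]
--
--     labels = []
--
--     if layout == "interleaved":
--         for g, level in enumerate(group_levels):
--             for r, re_name in enumerate(random_names):
--                 labels.append(f"{re_name}|{group_name}[{level}]")
--     else:  # blocked
--         for r, re_name in enumerate(random_names):
--             for g, level in enumerate(group_levels):
--                 labels.append(f"{re_name}|{group_name}[{level}]")
--
--     return labels
-- ===== SOURCE B (Python) =====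
-- def _generate_column_labels(
--     group_name,
--     group_levels,
--     random_names,
--     n_groups,
--     layout,
-- ):
--     levels = group_levels if group_levels is not None else [str(i) for i in range(n_groups)]
--     G = len(levels)
--     R = len(random_names)
--     # single flat loop: recover (group, effect) indices from the flat position by divmod
--     return [
--         f"{random_names[k % R]}|{group_name}[{levels[k // R]}]"
--         if layout == "interleaved"
--         else f"{random_names[k // G]}|{group_name}[{levels[k % G]}]"
--         for k in range(G * R)
--     ]
-- ===== Notes on version B (the rewrite author's own statement) =====
-- stated objective: alternative
-- what changed: Replaces A's two layout-specific nested enumerate loops by a single flat loop over range(G*R) that recovers the (group, effect) index pair from the flat position by divmod, chosen per layout.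
import Mathlib
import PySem

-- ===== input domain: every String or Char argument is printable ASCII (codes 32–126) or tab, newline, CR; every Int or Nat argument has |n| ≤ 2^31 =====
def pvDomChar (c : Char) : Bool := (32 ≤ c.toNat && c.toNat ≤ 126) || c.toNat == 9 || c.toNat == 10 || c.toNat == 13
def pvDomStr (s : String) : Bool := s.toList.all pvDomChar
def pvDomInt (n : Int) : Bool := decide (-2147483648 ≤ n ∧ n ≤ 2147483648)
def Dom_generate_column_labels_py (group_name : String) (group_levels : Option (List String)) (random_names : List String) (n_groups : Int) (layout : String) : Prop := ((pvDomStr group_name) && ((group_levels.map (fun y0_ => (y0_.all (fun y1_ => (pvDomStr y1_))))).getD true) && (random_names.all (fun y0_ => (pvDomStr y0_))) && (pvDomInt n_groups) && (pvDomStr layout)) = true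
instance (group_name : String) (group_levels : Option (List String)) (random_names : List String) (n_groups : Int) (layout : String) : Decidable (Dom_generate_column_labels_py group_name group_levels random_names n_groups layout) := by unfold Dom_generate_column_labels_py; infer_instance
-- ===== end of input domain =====

-- B replaces A's two layout-specific nested append loops by a single flat loop over
-- range(G*R) recovering (group, effect) indices by divmod: alternative decomposition, same cost.


-- ===== PORT A =====
-- literal transliteration of A: default levels from range(n_groups), then two nested
-- append loops, the nesting order chosen by the layout
def generate_column_labels_py (group_name : String) (group_levels : Option (List String)) (random_names : List String) (n_groups : Int) (layout : String) : List String :=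
  let levels : List String :=
    match group_levels with
    | none => (PySem.List.pyRange 0 n_groups 1).map PySem.Int.toStr
    | some ls => ls
  if layout == "interleaved" then
    levels.foldl (fun labels level =>
      random_names.foldl (fun labels re_name =>
        labels ++ [re_name ++ "|" ++ group_name ++ "[" ++ level ++ "]"]) labels) []
  else
    random_names.foldl (fun labels re_name =>
      levels.foldl (fun labels level =>
        labels ++ [re_name ++ "|" ++ group_name ++ "[" ++ level ++ "]"]) labels) []

-- ===== PORT B =====
-- literal transliteration of B: one flat comprehension over range(G*R); the indices
-- k // R, k % R (resp. k // G, k % G) are nonnegative and in range, so Python's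
-- // and % coincide with Nat division/modulo and indexing with getD "" is exact
def generate_column_labels_py_alt (group_name : String) (group_levels : Option (List String)) (random_names : List String) (n_groups : Int) (layout : String) : List String :=
  let levels : List String :=
    match group_levels with
    | none => (PySem.List.pyRange 0 n_groups 1).map PySem.Int.toStr
    | some ls => ls
  let G := levels.length
  let R := random_names.length
  (List.range (G * R)).map (fun k =>
    if layout == "interleaved" then
      (random_names.getD (k % R) "") ++ "|" ++ group_name ++ "[" ++ (levels.getD (k / R) "") ++ "]"
    else
      (random_names.getD (k / G) "") ++ "|" ++ group_name ++ "[" ++ (levels.getD (k % G) "") ++ "]")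

-- ===== PRECONDITION & SPEC =====
def Spec_generate_column_labels_py (group_name : String) (group_levels : Option (List String)) (random_names : List String) (n_groups : Int) (layout : String) (out : List String) : Prop := out = generate_column_labels_py_alt group_name group_levels random_names n_groups layout
instance (group_name : String) (group_levels : Option (List String)) (random_names : List String) (n_groups : Int) (layout : String) (out : List String) : Decidable (Spec_generate_column_labels_py group_name group_levels random_names n_groups layout out) := by unfold Spec_generate_column_labels_py; infer_instance

-- ===== CLAIM (what is proved, stated in full; the proofs are below) =====
def Claim_equal_generate_column_labels_py : Prop := ∀ (group_name : String) (group_levels : Option (List String)) (random_names : List String) (n_groups : Int) (layout : String), Dom_generate_column_labels_py group_name group_levels random_names n_groups layout → Spec_generate_column_labels_py group_name group_levels random_names n_groups layout (generate_column_labels_py group_name group_levels random_names n_groups layout)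

-- ===== LEMMAS AND PROOFS =====

-- A's nested append loops produce the flatten of the map-of-maps table
theorem double_loop (f : String → String → String) :
    ∀ (outer inner acc : List String),
    outer.foldl (fun a x => inner.foldl (fun b y => b ++ [f x y]) a) acc
      = acc ++ (outer.map (fun x => inner.map (fun y => f x y))).flatten := by
  intro outer
  induction outer with
  | nil => simp
  | cons x xs ih =>
    intro inner acc
    rw [List.foldl_cons, ih, PySem.List.foldl_append_singleton_eq_map]
    simp

-- reading each position of ys once, in order, rebuilds ys
theorem map_getD_range (h : String → String) :
    ∀ (ys : List String),
    (List.range ys.length).map (fun k => h (ys.getD k "")) = ys.map h := by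
  intro ys
  induction ys with
  | nil => simp
  | cons y t ih =>
    rw [List.length_cons, List.range_succ_eq_map]
    simp only [List.map_cons, List.map_map, Function.comp_def,
      List.getD_cons_zero, List.getD_cons_succ]
    rw [ih]

-- the flat divmod loop equals the row-major flatten of the nested table
theorem divmod_loop (f : String → String → String) (ys : List String) :
    ∀ (xs : List String),
    (List.range (xs.length * ys.length)).map (fun k =>
        f (xs.getD (k / ys.length) "") (ys.getD (k % ys.length) ""))
      = (xs.map (fun x => ys.map (fun y => f x y))).flatten := by
  intro xs
  induction xs with
  | nil => simp
  | cons x t ih =>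
    rcases Nat.eq_zero_or_pos ys.length with hL | hL
    · simp [List.length_eq_zero_iff.mp hL]
    · have hlen : (x :: t).length * ys.length = ys.length + t.length * ys.length := by
        rw [List.length_cons, Nat.succ_mul, Nat.add_comm]
      rw [hlen, List.range_add, List.map_append, List.map_map]
      congr 1
      · rw [List.map_congr_left (fun k hk => by
          rw [Nat.div_eq_of_lt (List.mem_range.mp hk),
              Nat.mod_eq_of_lt (List.mem_range.mp hk), List.getD_cons_zero])]
        exact map_getD_range (fun s => f x s) ys
      · calc (List.range (t.length * ys.length)).map
              ((fun k => f ((x :: t).getD (k / ys.length) "") (ys.getD (k % ys.length) "")) ∘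
                (ys.length + ·))
            = (List.range (t.length * ys.length)).map (fun k =>
                f (t.getD (k / ys.length) "") (ys.getD (k % ys.length) "")) := by
              refine List.map_congr_left (fun k _ => ?_)
              simp only [Function.comp_apply]
              rw [Nat.add_comm ys.length k, Nat.add_div_right _ hL, Nat.add_mod_right,
                  List.getD_cons_succ]
          _ = _ := ih

-- ===== VERDICT (by name: the statement is the Claim_ definition above) =====
theorem generate_column_labels_py_spec : Claim_equal_generate_column_labels_py := by
  intro group_name group_levels random_names n_groups layout _
  unfold Spec_generate_column_labels_py generate_column_labels_py generate_column_labels_py_alt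
  cases group_levels <;> by_cases h : layout == "interleaved" <;>
    simp only [h, if_pos, if_neg, Bool.false_eq_true, not_false_iff] <;>
  · first
      | · rw [double_loop (fun level re_name => re_name ++ "|" ++ group_name ++ "[" ++ level ++ "]"),
              divmod_loop (fun level re_name => re_name ++ "|" ++ group_name ++ "[" ++ level ++ "]")]
          simp
      | · rw [double_loop (fun re_name level => re_name ++ "|" ++ group_name ++ "[" ++ level ++ "]"),
              Nat.mul_comm,
              divmod_loop (fun re_name level => re_name ++ "|" ++ group_name ++ "[" ++ level ++ "]")]
          simp
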